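-- pv_equiv track=rewrite | github.com/menghanii/LeetCode | 210705_부녀회장이될테야.py | calculate_ppl
-- ===== SOURCE A (Python) =====
-- def calculate_ppl(k, n):
--     floor = 1
--     status = list(range(1, n+1)) # 0층 n호까지 사람의 수
--     while floor != k:
--         answer = []
--         men = 0
--         for s in status:
--             men += s
--             answer.append(men)
--         status = answer
--         floor += 1
--     return sum(status)
-- ===== SOURCE B (Python) =====
-- def calculate_ppl(k, n):
--     # closed form: answer = C(n+k, k+1), computed by an exact incremental binomial product
--     if n <= 0:
--         return 0
--     r = 1
--     for i in range(1, k + 2):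
--         r = r * (n + i - 1) // i
--     return r
-- ===== Notes on version B (the rewrite author's own statement) =====
-- stated objective: faster
-- what changed: Replaces the k-1 rounds of prefix sums over the room list by the closed-form binomial coefficient C(n+k, k+1) (hockey-stick identity), computed with one exact incremental product loop.
import Mathlib
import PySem

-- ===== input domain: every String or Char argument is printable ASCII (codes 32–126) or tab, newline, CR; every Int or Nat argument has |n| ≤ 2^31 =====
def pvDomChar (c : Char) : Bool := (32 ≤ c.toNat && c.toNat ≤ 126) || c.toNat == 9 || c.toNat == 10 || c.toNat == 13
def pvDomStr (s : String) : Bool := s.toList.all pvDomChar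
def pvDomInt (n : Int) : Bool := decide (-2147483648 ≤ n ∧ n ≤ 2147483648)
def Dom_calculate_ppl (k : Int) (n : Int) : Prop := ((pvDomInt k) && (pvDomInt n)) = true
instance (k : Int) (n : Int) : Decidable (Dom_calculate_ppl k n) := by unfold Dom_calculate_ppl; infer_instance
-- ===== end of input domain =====

-- B replaces the k-1 rounds of prefix sums by the closed-form binomial C(n+k, k+1)
-- (hockey-stick identity), computed by one exact incremental product loop: O(k) instead of O(k*n).

-- ===== PORT A =====
-- inner 'for s in status: men += s; answer.append(men)' loop of A;
-- list.append is ported as cons onto a reversed accumulator + final reverse (Python's O(1) append)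
def pvStepA (status : List Int) : List Int :=
  ((status.foldl (fun (p : List Int × Int) s => ((p.2 + s) :: p.1, p.2 + s)) (([] : List Int), (0 : Int))).1).reverse

-- 'while floor != k' loop of A; for floor > k Python diverges (excluded by Pre_), the port stops
def pvLoopA (k : Int) (floor : Int) (status : List Int) : List Int :=
  if floor = k then status
  else if _h : floor < k then pvLoopA k (floor + 1) (pvStepA status)
  else status
termination_by (k - floor).toNat
decreasing_by omega

-- sum(status): Python's sum is a left fold with start 0
def calculate_ppl (k : Int) (n : Int) : Int :=
  (pvLoopA k 1 (PySem.List.pyRange 1 (n + 1) 1)).foldl (· + ·) 0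

-- ===== PORT B =====
def calculate_ppl_alt (k : Int) (n : Int) : Int :=
  if n ≤ 0 then 0
  else (PySem.List.pyRange 1 (k + 2) 1).foldl (fun r i => PySem.Int.floordiv (r * (n + i - 1)) i) 1

-- ===== PRECONDITION & SPEC =====
-- For k < 1 the Python 'while floor != k' loop never terminates (floor starts at 1 and only grows).
def Pre_calculate_ppl (k : Int) (n : Int) : Prop := 1 ≤ k
instance (k : Int) (n : Int) : Decidable (Pre_calculate_ppl k n) := by unfold Pre_calculate_ppl; infer_instance
def pvWitness_calculate_ppl : Int × Int := (3, 4)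

def Spec_calculate_ppl (k : Int) (n : Int) (out : Int) : Prop := out = calculate_ppl_alt k n
instance (k : Int) (n : Int) (out : Int) : Decidable (Spec_calculate_ppl k n out) := by unfold Spec_calculate_ppl; infer_instance

-- ===== CLAIM (what is proved, stated in full; the proofs are below) =====
def Claim_equal_calculate_ppl : Prop := ∀ (k : Int) (n : Int), Dom_calculate_ppl k n → Pre_calculate_ppl k n → Spec_calculate_ppl k n (calculate_ppl k n)

-- ===== LEMMAS AND PROOFS =====

-- functional form of A's inner loop
def pvSums (c : Int) : List Int → List Int
  | [] => []
  | x :: xs => (c + x) :: pvSums (c + x) xs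

theorem pv_foldl_sums (l : List Int) : ∀ (a0 : List Int) (c : Int),
    (l.foldl (fun (p : List Int × Int) s => ((p.2 + s) :: p.1, p.2 + s)) (a0, c)).1
      = (pvSums c l).reverse ++ a0 := by
  induction l with
  | nil => simp [pvSums]
  | cons x xs ih => intro a0 c; simp [List.foldl, pvSums, ih]

theorem pvStepA_eq (l : List Int) : pvStepA l = pvSums 0 l := by
  simp [pvStepA, pv_foldl_sums l [] 0]

theorem pvSums_map_range : ∀ (N : Nat) (f : Nat → Int) (c : Int),
    pvSums c ((List.range N).map f)
      = (List.range N).map (fun m => c + ((List.range (m + 1)).map f).sum) := by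
  intro N
  induction N with
  | zero => intro f c; simp [pvSums]
  | succ N ih =>
    intro f c
    rw [List.range_succ_eq_map, List.map_cons, List.map_map, pvSums, ih,
        List.map_cons, List.map_map]
    congr 1
    · simp
    · apply List.map_congr_left
      intro m _
      simp only [Function.comp_apply]
      conv_rhs => rw [List.range_succ_eq_map]
      simp [List.map_map, Function.comp_def]
      ring

-- A's status at floor j+1 (0-indexed round j): room m+1 holds C(m+1+j, j+1) people
def pvRow (j N : Nat) : List Int := (List.range N).map (fun m => ((m + 1 + j).choose (j + 1) : Int))

theorem pv_hockey (j : Nat) : ∀ (m : Nat),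
    ((List.range (m + 1)).map (fun i => ((i + 1 + j).choose (j + 1) : Int))).sum
      = ((m + 2 + j).choose (j + 2) : Int) := by
  intro m
  induction m with
  | zero =>
    have h1 : 1 + j = j + 1 := by omega
    have h2 : 0 + 2 + j = j + 2 := by omega
    simp [h1, h2, Nat.choose_self]
  | succ m ih =>
    rw [List.range_succ, List.map_append, List.sum_append, ih]
    have e1 : m + 1 + 1 + j = m + 2 + j := by omega
    have e2 : m + 1 + 2 + j = m + 2 + j + 1 := by omega
    simp only [List.map_cons, List.map_nil, List.sum_cons, List.sum_nil, add_zero]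
    rw [e1, e2, Nat.choose_succ_succ (m + 2 + j) (j + 1)]
    push_cast
    ring

theorem pv_step_row (j N : Nat) : pvSums 0 (pvRow j N) = pvRow (j + 1) N := by
  unfold pvRow
  rw [pvSums_map_range]
  apply List.map_congr_left
  intro m _
  rw [pv_hockey j m, zero_add]
  norm_cast
  congr 1 <;> omega

theorem pv_loopA_row : ∀ (t : Nat) (floor : Int) (j N : Nat),
    pvLoopA (floor + (t : Int)) floor (pvRow j N) = pvRow (j + t) N := by
  intro t
  induction t with
  | zero =>
    intro floor j N
    rw [pvLoopA]
    simp
  | succ t ih =>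
    intro floor j N
    rw [pvLoopA, if_neg (by push_cast; omega), dif_pos (by push_cast; omega)]
    rw [pvStepA_eq, pv_step_row]
    have e : floor + ((t + 1 : Nat) : Int) = (floor + 1) + (t : Int) := by push_cast; ring
    rw [e, ih]
    congr 1
    omega

theorem pv_init_row (n : Int) : PySem.List.pyRange 1 (n + 1) 1 = pvRow 0 n.toNat := by
  rw [PySem.List.pyRange_one]
  unfold pvRow
  have e : (n + 1 - 1).toNat = n.toNat := by omega
  rw [e]
  apply List.map_congr_left
  intro m _
  simp [Nat.choose_one_right]
  ring

theorem pv_bfold (n : Int) (hn : 1 ≤ n) : ∀ (t : Nat),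
    (PySem.List.pyRange 1 (1 + (t : Int)) 1).foldl
        (fun r i => PySem.Int.floordiv (r * (n + i - 1)) i) 1
      = ((n.toNat - 1 + t).choose t : Int) := by
  intro t
  induction t with
  | zero =>
    simp [PySem.List.pyRange_one_eq_nil]
  | succ t ih =>
    have e : (1 : Int) + ((t + 1 : Nat) : Int) = (1 + (t : Int)) + 1 := by push_cast; ring
    rw [e, PySem.List.pyRange_one_succ_right (by omega), List.foldl_append, ih]
    simp only [List.foldl_cons, List.foldl_nil]
    have e2 : n + (1 + (t : Int)) - 1 = ((n.toNat + t : Nat) : Int) := by push_cast; omega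
    have e3 : (1 : Int) + (t : Int) = ((t + 1 : Nat) : Int) := by push_cast; ring
    rw [e2, e3, ← Nat.cast_mul, PySem.Int.floordiv_natCast]
    congr 1
    have h1 : n.toNat - 1 + t + 1 = n.toNat + t := by omega
    have h2 := Nat.add_one_mul_choose_eq (n.toNat - 1 + t) t
    rw [h1] at h2
    rw [Nat.mul_comm, h2, Nat.mul_div_cancel _ (by omega)]
    congr 1
    omega

-- ===== VERDICT (by name: the statement is the Claim_ definition above) =====
theorem calculate_ppl_spec : Claim_equal_calculate_ppl := by
  unfold Claim_equal_calculate_ppl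
  intro k n _ hpre
  unfold Pre_calculate_ppl at hpre
  unfold Spec_calculate_ppl calculate_ppl calculate_ppl_alt
  obtain ⟨t, ht⟩ : ∃ t : Nat, k = 1 + (t : Int) := ⟨(k - 1).toNat, by omega⟩
  subst ht
  rw [pv_init_row, pv_loopA_row t 1 0 n.toNat, zero_add]
  by_cases hn : n ≤ 0
  · have h0 : n.toNat = 0 := by omega
    simp [h0, pvRow, hn]
  · rw [if_neg hn]
    have e : (1 : Int) + (t : Int) + 2 = 1 + ((t + 2 : Nat) : Int) := by push_cast; ring
    rw [e, pv_bfold n (by omega)]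
    have hN1 : 1 ≤ n.toNat := by omega
    rw [← List.sum_eq_foldl]
    unfold pvRow
    conv_lhs => rw [show n.toNat = (n.toNat - 1) + 1 from by omega]
    rw [pv_hockey t (n.toNat - 1)]
    norm_cast
    congr 1
    omega
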